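-- pv_equiv track=rewrite | github.com/Murrphyy/llm_comparison_refactoring | data/Python_wrapped/p02686/s598895255.py | valuer
-- ===== SOURCE A (Python) =====
-- def valuer(s):
--     o = 0
--     for c in s:
--         if c == '(':
--             o += 1
--         else:
--             o -= 1
--     return o
-- ===== SOURCE B (Python) =====
-- def valuer(s):
--     return 2 * s.count('(') - len(s)
-- ===== Notes on version B (the rewrite author's own statement) =====
-- stated objective: simpler
-- what changed: Replaces the per-character branching loop by the closed-form arithmetic 2 * s.count('(') - len(s), since each open parenthesis contributes +1 and every other character contributes -1.
import Mathlib
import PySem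

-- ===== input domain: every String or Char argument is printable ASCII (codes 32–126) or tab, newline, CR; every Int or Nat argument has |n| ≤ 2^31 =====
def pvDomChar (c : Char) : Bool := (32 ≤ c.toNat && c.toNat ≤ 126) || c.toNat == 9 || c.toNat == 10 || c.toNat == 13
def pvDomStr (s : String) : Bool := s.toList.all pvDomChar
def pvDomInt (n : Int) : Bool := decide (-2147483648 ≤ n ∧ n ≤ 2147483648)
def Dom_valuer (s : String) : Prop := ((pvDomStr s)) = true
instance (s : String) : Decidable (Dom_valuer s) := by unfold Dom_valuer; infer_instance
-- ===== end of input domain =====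

-- B replaces A's per-character branching loop by the closed form 2*s.count('(') - len(s); objective: simpler.

-- ===== PORT A =====
-- for c in s: if c == '(': o += 1 else: o -= 1
def valuer (s : String) : Int :=
  s.toList.foldl (fun o c => if c == '(' then o + 1 else o - 1) 0

-- ===== PORT B =====
-- return 2 * s.count('(') - len(s)
def valuer_alt (s : String) : Int :=
  2 * (PySem.Str.count s "(" : Int) - PySem.Str.len s

-- ===== PRECONDITION & SPEC =====
def Spec_valuer (s : String) (out : Int) : Prop := out = valuer_alt s
instance (s : String) (out : Int) : Decidable (Spec_valuer s out) := by unfold Spec_valuer; infer_instance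

-- ===== CLAIM (what is proved, stated in full; the proofs are below) =====
def Claim_equal_valuer : Prop := ∀ (s : String), Dom_valuer s → Spec_valuer s (valuer s)

-- ===== LEMMAS AND PROOFS =====

-- Chars.count with a single-character needle is List.count.
theorem count_go_singleton (c : Char) (l : List Char) (fuel acc : Nat)
    (h : l.length ≤ fuel) :
    PySem.Chars.count.go [c] fuel l acc = acc + l.count c := by
  induction l generalizing fuel acc with
  | nil => cases fuel <;> simp [PySem.Chars.count.go]
  | cons x t ih =>
    cases fuel with
    | zero => simp at h
    | succ n =>
      simp only [PySem.Chars.count.go]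
      by_cases hx : x = c
      · subst hx
        simp only [List.isPrefixOf, beq_self_eq_true, Bool.true_and, if_pos,
          List.length_singleton, List.drop_succ_cons, List.drop_zero]
        rw [ih n (acc + 1) (by simpa using Nat.le_of_succ_le_succ h)]
        simp
        omega
      · have hpre : [c].isPrefixOf (x :: t) = false := by
          simp [List.isPrefixOf]; exact fun hc => (hx hc.symm).elim
        rw [hpre]
        simp only [if_neg Bool.false_ne_true]
        rw [ih n acc (by simpa using Nat.le_of_succ_le_succ h)]
        simp [hx]
  
theorem chars_count_singleton (c : Char) (l : List Char) :
    PySem.Chars.count l [c] = l.count c := by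
  simp [PySem.Chars.count, count_go_singleton c l l.length 0 le_rfl]

theorem foldl_paren (l : List Char) (a : Int) :
    l.foldl (fun o c => if c == '(' then o + 1 else o - 1) a
      = a + 2 * (l.count '(' : Int) - l.length := by
  induction l generalizing a with
  | nil => simp
  | cons x t ih =>
    simp only [List.foldl_cons, ih, List.count_cons, List.length_cons]
    by_cases hx : x = '(' <;> simp [hx] <;> ring

-- ===== VERDICT (by name: the statement is the Claim_ definition above) =====
theorem valuer_spec : Claim_equal_valuer := by
  unfold Claim_equal_valuer
  intro s _
  unfold Spec_valuer valuer valuer_alt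
  have hc : PySem.Str.count s "(" = s.toList.count '(' := by
    have := chars_count_singleton '(' s.toList
    simpa [PySem.Str.count] using this
  rw [hc, foldl_paren]
  simp [PySem.Str.len_eq]
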